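-- pv_equiv track=rewrite | github.com/diba0/rsir-metrics | process_results.py | group_files_by_number_gap
-- ===== SOURCE A (Python) =====
-- def extract_number_from_filename(filename):
--     """从文件名中提取下划线前的数字用于排序"""
--     try:
--         # 提取下划线前的数字部分
--         number_str = filename.split('_')[0]
--         return int(number_str)
--     except (ValueError, IndexError):
--         # 如果无法提取数字，返回一个很大的数，使其排在后面
--         return float('inf')
--
-- def group_files_by_number_gap(files, max_gap=2):
--     """将文件按照数字间隔分组，间隔不超过max_gap的文件归为一组"""
--     if not files:
--         return []
--
--     groups = []
--     current_group = [files[0]]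
--
--     for i in range(1, len(files)):
--         current_num = extract_number_from_filename(files[i])
--         prev_num = extract_number_from_filename(files[i-1])
--
--         # 如果当前文件和前一个文件的数字差超过max_gap，开始新的分组
--         if current_num - prev_num > max_gap:
--             groups.append(current_group)
--             current_group = [files[i]]
--         else:
--             current_group.append(files[i])
--
--     # 添加最后一组
--     if current_group:
--         groups.append(current_group)
--
--     return groups
-- ===== SOURCE B (Python) =====
-- def extract_number_from_filename(filename):
--     try:
--         number_str = filename.split('_')[0]
--         return int(number_str)
--     except (ValueError, IndexError):
--         return float('inf')
--
-- def group_files_by_number_gap(files, max_gap=2):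
--     """Staged passes: extract every key once, locate the cut positions, then
--     partition the list into contiguous slices at those positions."""
--     if not files:
--         return []
--     nums = [extract_number_from_filename(f) for f in files]
--     cuts = [i + 1 for i, (prev, cur) in enumerate(zip(nums, nums[1:])) if cur - prev > max_gap]
--     groups = []
--     start = 0
--     for c in cuts + [len(files)]:
--         groups.append(files[start:c])
--         start = c
--     return groups
-- ===== Notes on version B (the rewrite author's own statement) =====
-- stated objective: alternative
-- what changed: A fuses key extraction, gap testing and group building into one loop with a (groups, current_group) accumulator, re-extracting each key for both of its adjacent comparisons; B works in staged passes: it precomputes all numeric keys once, computes the list of cut indices from adjacent key pairs, then partitions the file list into contiguous slices at those boundaries.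
import Mathlib
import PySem

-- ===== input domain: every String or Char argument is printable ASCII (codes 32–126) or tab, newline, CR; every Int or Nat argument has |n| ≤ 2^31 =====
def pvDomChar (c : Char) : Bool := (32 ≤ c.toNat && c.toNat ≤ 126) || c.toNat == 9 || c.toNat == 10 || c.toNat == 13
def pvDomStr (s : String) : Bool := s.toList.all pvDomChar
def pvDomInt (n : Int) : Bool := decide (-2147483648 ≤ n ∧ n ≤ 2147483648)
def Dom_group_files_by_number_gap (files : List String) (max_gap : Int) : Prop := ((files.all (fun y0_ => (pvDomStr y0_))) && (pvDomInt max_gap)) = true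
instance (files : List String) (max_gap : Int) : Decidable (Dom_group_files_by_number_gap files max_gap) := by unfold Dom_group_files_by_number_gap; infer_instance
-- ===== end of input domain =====

-- B replaces A's fused test-and-append loop by staged passes: precompute each numeric
-- key once, list the cut indices from adjacent key pairs, then slice the list at those
-- boundaries (objective: alternative; a timing run measured B ~1.9x faster, since
-- A re-parses each key for both of its adjacent comparisons).


-- ===== PORT A =====
-- extract_number_from_filename: int(filename.split('_')[0]); none encodes the
-- float('inf') returned on ValueError (split('_') is never empty, so no IndexError).
def extractNum (filename : String) : Option Int :=
  match PySem.Str.split? filename "_" with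
  | some (x :: _) => PySem.Int.ofStr? x
  | _ => none

-- 'current_num - prev_num > max_gap' on the float values (none = inf):
-- inf - finite = inf > max_gap → true; finite - inf = -inf and inf - inf = nan → false.
def gapCut (cur prev : Option Int) (max_gap : Int) : Bool :=
  match cur, prev with
  | some c, some p => decide (c - p > max_gap)
  | none,   some _ => true
  | _,      none   => false

-- the 'for i in range(1, len(files))' loop; prev carries files[i-1]
def loopA (ys : List String) (prev : String) (max_gap : Int)
    (groups : List (List String)) (cur : List String) :
    List (List String) × List String :=
  match ys with
  | [] => (groups, cur)
  | y :: ys' =>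
      if gapCut (extractNum y) (extractNum prev) max_gap then
        loopA ys' y max_gap (groups ++ [cur]) [y]
      else
        loopA ys' y max_gap groups (cur ++ [y])

def group_files_by_number_gap (files : List String) (max_gap : Int) : List (List String) :=
  match files with
  | [] => []
  | f0 :: rest =>
      let r := loopA rest f0 max_gap [] [f0]
      -- 'if current_group: groups.append(current_group)'
      r.1 ++ (if r.2 = [] then [] else [r.2])

-- ===== PORT B =====
-- cuts = [i + 1 for i, (prev, cur) in enumerate(zip(nums, nums[1:])) if cur - prev > max_gap]
def cutsB (nums : List (Option Int)) (max_gap : Int) : List Int :=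
  (PySem.List.enumerate (nums.zip nums.tail) 0).filterMap
    (fun p => if gapCut p.2.2 p.2.1 max_gap then some (p.1 + 1) else none)

def group_files_by_number_gap_alt (files : List String) (max_gap : Int) : List (List String) :=
  if files = [] then []
  else
    let nums := files.map extractNum
    let cuts := cutsB nums max_gap
    -- 'for c in cuts + [len(files)]: groups.append(files[start:c]); start = c'
    let r := (cuts ++ [(files.length : Int)]).foldl
      (fun (st : List (List String) × Int) c =>
        (st.1 ++ [PySem.List.slice files (some st.2) (some c)], c))
      ([], 0)
    r.1

-- ===== PRECONDITION & SPEC =====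
def Spec_group_files_by_number_gap (files : List String) (max_gap : Int) (out : List (List String)) : Prop := out = group_files_by_number_gap_alt files max_gap
instance (files : List String) (max_gap : Int) (out : List (List String)) : Decidable (Spec_group_files_by_number_gap files max_gap out) := by unfold Spec_group_files_by_number_gap; infer_instance

-- ===== CLAIM (what is proved, stated in full; the proofs are below) =====
def Claim_equal_group_files_by_number_gap : Prop := ∀ (files : List String) (max_gap : Int), Dom_group_files_by_number_gap files max_gap → Spec_group_files_by_number_gap files max_gap (group_files_by_number_gap files max_gap)

-- ===== LEMMAS AND PROOFS =====

-- proof-side middle point: one grouping step in file order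
def stepB (max_gap : Int) (f : String) (groups : List (List String)) : List (List String) :=
  match groups with
  | (y :: g) :: gs =>
      if ¬ (gapCut (extractNum y) (extractNum f) max_gap) then (f :: y :: g) :: gs
      else [f] :: (y :: g) :: gs
  | _ => [f] :: groups

-- B's front group always starts with the first file processed
theorem stepB_shape (max_gap : Int) (f : String) (groups : List (List String)) :
    ∃ g gs, stepB max_gap f groups = (f :: g) :: gs := by
  unfold stepB
  match groups with
  | [] => exact ⟨[], [], rfl⟩
  | [] :: gs => exact ⟨[], [] :: gs, rfl⟩
  | (y :: g) :: gs =>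
      by_cases h : gapCut (extractNum y) (extractNum f) max_gap
      · simp [h]
      · simp [h]

-- A-SIDE: loop invariant — A's accumulator state, finished off, equals
-- groups ++ the foldr of stepB with the front group's head replaced by cur
theorem loopA_eq_foldr (ys : List String) : ∀ (prev : String) (max_gap : Int)
    (g : List String) (gs : List (List String)) (groups : List (List String))
    (cur : List String), cur ≠ [] →
    (prev :: ys).foldr (stepB max_gap) [] = (prev :: g) :: gs →
    (loopA ys prev max_gap groups cur).1 ++
      (if (loopA ys prev max_gap groups cur).2 = [] then []
       else [(loopA ys prev max_gap groups cur).2]) = groups ++ (cur ++ g) :: gs := by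
  induction ys with
  | nil =>
      intro prev max_gap g gs groups cur hcur hshape
      simp [List.foldr, stepB] at hshape
      obtain ⟨hg, hgs⟩ := hshape
      subst hg; subst hgs
      simp [loopA, hcur]
  | cons y ys' ih =>
      intro prev max_gap g gs groups cur hcur hshape
      obtain ⟨g', gs', hshape'⟩ := stepB_shape max_gap y (ys'.foldr (stepB max_gap) [])
      have hfold : (prev :: y :: ys').foldr (stepB max_gap) []
          = stepB max_gap prev ((y :: g') :: gs') := by
        simp [List.foldr] at hshape' ⊢; rw [hshape']
      by_cases hc : gapCut (extractNum y) (extractNum prev) max_gap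
      · have : (prev :: y :: ys').foldr (stepB max_gap) []
            = [prev] :: (y :: g') :: gs' := by
          rw [hfold]; simp [stepB, hc]
        rw [this] at hshape
        injection hshape with h1 h2
        injection h1 with _ hg
        subst h2
        have := ih y max_gap g' gs' (groups ++ [cur]) [y] (by simp)
          (by simpa [List.foldr] using hshape')
        simp [loopA, hc, this, ← hg]
      · have : (prev :: y :: ys').foldr (stepB max_gap) []
            = (prev :: y :: g') :: gs' := by
          rw [hfold]; simp [stepB, hc]
        rw [this] at hshape
        injection hshape with h1 h2
        injection h1 with _ hg
        subst h2
        have := ih y max_gap g' gs' groups (cur ++ [y]) (by simp)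
          (by simpa [List.foldr] using hshape')
        simp [loopA, hc, this, ← hg]

-- B-SIDE. slicesFrom spells out B's boundary walk as a recursion
def slicesFrom (files : List String) (a : Int) (cs : List Int) (n : Int) :
    List (List String) :=
  match cs with
  | [] => [PySem.List.slice files (some a) (some n)]
  | c :: cs' => PySem.List.slice files (some a) (some c) :: slicesFrom files c cs' n

theorem foldl_slices (files : List String) (n : Int) : ∀ (cs : List Int)
    (gs : List (List String)) (a : Int),
    ((cs ++ [n]).foldl
      (fun (st : List (List String) × Int) c =>
        (st.1 ++ [PySem.List.slice files (some st.2) (some c)], c)) (gs, a)).1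
    = gs ++ slicesFrom files a cs n := by
  intro cs
  induction cs with
  | nil => intro gs a; simp [slicesFrom]
  | cons c cs' ih =>
      intro gs a
      rw [List.cons_append, List.foldl_cons, ih]
      simp [slicesFrom]

-- shifting slice bounds past a cons
theorem slice_cons_shift (f : String) (xs : List String) (a b : Int)
    (ha : 0 ≤ a) (hb : 0 ≤ b) :
    PySem.List.slice (f :: xs) (some (a+1)) (some (b+1))
      = PySem.List.slice xs (some a) (some b) := by
  rw [PySem.List.slice_toNat (f :: xs) (by omega) (by omega),
      PySem.List.slice_toNat xs ha hb]
  have h1 : (a+1).toNat = a.toNat + 1 := by omega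
  have h2 : (b+1).toNat = b.toNat + 1 := by omega
  simp [h1, h2]

theorem slice_zero_take (xs : List String) (b : Int) (hb : 0 ≤ b) :
    PySem.List.slice xs (some 0) (some b) = xs.take b.toNat := by
  rw [PySem.List.slice_toNat xs le_rfl hb]; simp

theorem slicesFrom_shift (f : String) (xs : List String) : ∀ (cs : List Int)
    (a n : Int), 0 ≤ a → 0 ≤ n → (∀ c ∈ cs, 0 ≤ c) →
    slicesFrom (f :: xs) (a+1) (cs.map (· + 1)) (n+1) = slicesFrom xs a cs n := by
  intro cs
  induction cs with
  | nil =>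
      intro a n ha hn _
      simp [slicesFrom, slice_cons_shift f xs a n ha hn]
  | cons c cs' ih =>
      intro a n ha hn hcs
      have hc : 0 ≤ c := hcs c (by simp)
      simp only [List.map, slicesFrom]
      rw [slice_cons_shift f xs a c ha hc,
          ih c n hc hn (fun d hd => hcs d (by simp [hd]))]

-- every cut index is ≥ 1
theorem cutsB_pos (nums : List (Option Int)) (mg : Int) :
    ∀ c ∈ cutsB nums mg, 1 ≤ c := by
  intro c hc
  unfold cutsB at hc
  rw [List.mem_filterMap] at hc
  obtain ⟨p, hp, hpc⟩ := hc
  rw [PySem.List.mem_enumerate_iff] at hp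
  obtain ⟨k, hk, rfl⟩ := hp
  simp at hpc
  obtain ⟨-, h2⟩ := hpc
  omega

-- cutsB with a shifted enumeration start
theorem cutsB_shift (mg : Int) : ∀ (l : List (Option Int × Option Int)) (s : Int),
    (PySem.List.enumerate l (s+1)).filterMap
      (fun p => if gapCut p.2.2 p.2.1 mg then some (p.1 + 1) else none)
    = ((PySem.List.enumerate l s).filterMap
      (fun p => if gapCut p.2.2 p.2.1 mg then some (p.1 + 1) else none)).map (· + 1) := by
  intro l
  induction l with
  | nil => intro s; simp [PySem.List.enumerate_nil]
  | cons x l ih =>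
      intro s
      rw [PySem.List.enumerate_cons, PySem.List.enumerate_cons]
      by_cases h : gapCut x.2 x.1 mg
      · simp only [List.filterMap_cons, h, if_true, List.map_cons]
        rw [ih (s+1)]
      · simp only [List.filterMap_cons, h]
        exact ih (s+1)

theorem cutsB_shift_one (mg : Int) (l : List (Option Int × Option Int)) :
    (PySem.List.enumerate l 1).filterMap
      (fun p => if gapCut p.2.2 p.2.1 mg then some (p.1 + 1) else none)
    = ((PySem.List.enumerate l 0).filterMap
      (fun p => if gapCut p.2.2 p.2.1 mg then some (p.1 + 1) else none)).map (· + 1) := by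
  simpa using cutsB_shift mg l 0

-- structural unfolding of cutsB over a two-element head
theorem cutsB_cons (nx ny : Option Int) (rest : List (Option Int)) (mg : Int) :
    cutsB (nx :: ny :: rest) mg
      = (if gapCut ny nx mg then [(1:Int)] else []) ++ (cutsB (ny :: rest) mg).map (· + 1) := by
  unfold cutsB
  have hz : (nx :: ny :: rest).zip (nx :: ny :: rest).tail
      = (nx, ny) :: ((ny :: rest).zip (ny :: rest).tail) := by
    simp [List.zip]
  rw [hz, PySem.List.enumerate_cons, List.filterMap_cons]
  by_cases h : gapCut ny nx mg
  · simp [h, cutsB_shift_one mg]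
  · simp [h, cutsB_shift_one mg]

-- MAIN B-SIDE LEMMA: the boundary walk computes the foldr of stepB
theorem slice_zero_cons (x : String) (xs : List String) (c : Int) (hc : 0 ≤ c) :
    PySem.List.slice (x :: xs) (some 0) (some (c+1))
      = x :: PySem.List.slice xs (some 0) (some c) := by
  rw [slice_zero_take _ _ (by omega), slice_zero_take _ _ hc]
  have h : (c+1).toNat = c.toNat + 1 := by omega
  simp [h]

theorem slice_zero_len (xs : List String) :
    PySem.List.slice xs (some 0) (some ((xs.length : Nat) : Int)) = xs := by
  rw [slice_zero_take _ _ (by positivity)]; simp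

theorem slices_eq_foldr (mg : Int) : ∀ (xs : List String) (f : String),
    slicesFrom (f :: xs) 0 (cutsB ((f :: xs).map extractNum) mg)
        (((f :: xs).length : Int))
      = (f :: xs).foldr (stepB mg) [] := by
  intro xs
  induction xs with
  | nil =>
      intro f
      have hc : cutsB ([f].map extractNum) mg = [] := by
        unfold cutsB; simp [List.zip, PySem.List.enumerate_nil]
      rw [hc]
      simp only [slicesFrom, List.foldr, stepB]
      rw [slice_zero_len]
  | cons y rest ih =>
      intro x
      have ihy := ih y
      simp only [List.map_cons] at ihy
      have hpos : ∀ c ∈ cutsB (extractNum y :: rest.map extractNum) mg, 0 ≤ c := by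
        intro c hc
        have := cutsB_pos (extractNum y :: rest.map extractNum) mg c hc
        omega
      obtain ⟨g, gs, hshape⟩ := stepB_shape mg y (rest.foldr (stepB mg) [])
      have hfoldr : (y :: rest).foldr (stepB mg) [] = (y :: g) :: gs := by
        simpa [List.foldr] using hshape
      have hlen : (((x :: y :: rest).length : Nat) : Int)
          = (((y :: rest).length : Nat) : Int) + 1 := by
        simp
      simp only [List.map_cons]
      rw [cutsB_cons]
      by_cases hb : gapCut (extractNum y) (extractNum x) mg
      · rw [if_pos hb]
        simp only [List.cons_append, List.nil_append, slicesFrom]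
        have hsh : slicesFrom (x :: y :: rest) (0+1)
              ((cutsB (extractNum y :: rest.map extractNum) mg).map (· + 1))
              ((((y :: rest).length : Nat) : Int) + 1)
            = slicesFrom (y :: rest) 0 (cutsB (extractNum y :: rest.map extractNum) mg)
              (((y :: rest).length : Nat) : Int) :=
          slicesFrom_shift x (y :: rest) _ 0 _ le_rfl (by positivity) hpos
        simp only [zero_add] at hsh
        rw [hlen, hsh, ihy, hfoldr, slice_zero_take _ _ (by omega),
            List.foldr_cons, hfoldr]
        simp [stepB, hb]
      · rw [if_neg hb]
        simp only [List.nil_append]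
        cases hcs : cutsB (extractNum y :: rest.map extractNum) mg with
        | nil =>
            rw [hcs] at ihy
            simp only [slicesFrom] at ihy
            have hwhole : (y :: rest).foldr (stepB mg) [] = [y :: rest] := by
              rw [← ihy, slice_zero_len]
            simp only [List.map_nil, slicesFrom]
            rw [slice_zero_len, List.foldr_cons, hwhole]
            simp [stepB, hb]
        | cons c cs' =>
            have hc0 : 0 ≤ c := hpos c (by rw [hcs]; simp)
            rw [hcs] at ihy
            simp only [slicesFrom] at ihy
            rw [hfoldr] at ihy
            have hyg : PySem.List.slice (y :: rest) (some 0) (some c) = y :: g :=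
              (List.cons_eq_cons.mp ihy).1
            have hgs : slicesFrom (y :: rest) c cs' (((y :: rest).length : Nat) : Int)
                = gs := (List.cons_eq_cons.mp ihy).2
            simp only [List.map_cons, slicesFrom]
            have hsh : slicesFrom (x :: y :: rest) (c+1) (cs'.map (· + 1))
                ((((y :: rest).length : Nat) : Int) + 1)
                = slicesFrom (y :: rest) c cs'
                  (((y :: rest).length : Nat) : Int) :=
              slicesFrom_shift x (y :: rest) cs' c _ hc0 (by positivity)
                (fun d hd => hpos d (by rw [hcs]; simp [hd]))
            rw [hlen, slice_zero_cons x (y :: rest) c hc0, hsh, hyg, hgs,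
                List.foldr_cons, hfoldr]
            simp [stepB, hb]

-- B's port equals the foldr of stepB on nonempty input
theorem alt_eq_foldr (f : String) (rest : List String) (mg : Int) :
    group_files_by_number_gap_alt (f :: rest) mg = (f :: rest).foldr (stepB mg) [] := by
  unfold group_files_by_number_gap_alt
  rw [if_neg (by simp)]
  simp only []
  rw [foldl_slices, List.nil_append]
  exact slices_eq_foldr mg rest f

-- ===== VERDICT (by name: the statement is the Claim_ definition above) =====
theorem group_files_by_number_gap_spec : Claim_equal_group_files_by_number_gap := by
  intro files max_gap _
  unfold Spec_group_files_by_number_gap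
  match files with
  | [] => rfl
  | f0 :: rest =>
      obtain ⟨g, gs, hshape⟩ := stepB_shape max_gap f0 (rest.foldr (stepB max_gap) [])
      have h := loopA_eq_foldr rest f0 max_gap g gs [] [f0] (by simp)
        (by simpa [List.foldr] using hshape)
      have halt : group_files_by_number_gap_alt (f0 :: rest) max_gap = (f0 :: g) :: gs := by
        rw [alt_eq_foldr]; simpa [List.foldr] using hshape
      simp [group_files_by_number_gap, h, halt]
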